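-- pv_equiv track=rewrite | github.com/Liyue1d/GNN_BNB | python/SWIG_TwoOptClient/trifinal.py | Borne
-- ===== SOURCE A (Python) =====
-- def Borne(lenAdjacence):
-- 	borne=0
-- 	for i in range(0,lenAdjacence):
-- 		borne+=2**i				#la borne sera maximale si chaque noeud est un passage obligatoire. On obtient donc une valeur maximale des passages obligatoires par cette boucle
-- 	a=(lenAdjacence-1)				#le noeud d'arrivée a a pour valeur maximale le noeud lenAdjacence-1 (car les noeuds vont de 0 à lenAdjacence)
-- 	d=(lenAdjacence-1)				#le noeud de départ d a pour valeur maximale le noeud lenAdjacence-1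
--
-- 	#On a donc trois valeurs. Une pour les passages obligatoires, une pour le noeud d'arrivée et une pour le noeud de départ
-- 	da=(a+d*lenAdjacence)*10**(len(str(borne)))	#On considère que les valeur a et d sont en base lenAdjacence (encodage lenAdjacence). On passe en base 10 par le calcul a+d*lenAdjacence. On multiplie alors la valeur obtenue par 10 puissance le nombre de chiffres de la borne. Cela permet de ne pas écraser les valeurs lors de l'addition suivante.
-- 	borne=da+borne
--
-- 	return borne
-- ===== SOURCE B (Python) =====
-- def Borne(lenAdjacence):
--     # closed form: sum of 2**i for i in range(lenAdjacence) is 2**lenAdjacence - 1 (0 if non-positive)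
--     borne = 2**lenAdjacence - 1 if lenAdjacence > 0 else 0
--     return (lenAdjacence - 1) * (lenAdjacence + 1) * 10**len(str(borne)) + borne
-- ===== Notes on version B (the rewrite author's own statement) =====
-- stated objective: faster
-- what changed: replaces the loop that sums successive powers of two (quadratic in total bit operations) by the geometric-sum closed form computed with a single exponentiation, and folds the a+d*n encoding into a factored product
import Mathlib
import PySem

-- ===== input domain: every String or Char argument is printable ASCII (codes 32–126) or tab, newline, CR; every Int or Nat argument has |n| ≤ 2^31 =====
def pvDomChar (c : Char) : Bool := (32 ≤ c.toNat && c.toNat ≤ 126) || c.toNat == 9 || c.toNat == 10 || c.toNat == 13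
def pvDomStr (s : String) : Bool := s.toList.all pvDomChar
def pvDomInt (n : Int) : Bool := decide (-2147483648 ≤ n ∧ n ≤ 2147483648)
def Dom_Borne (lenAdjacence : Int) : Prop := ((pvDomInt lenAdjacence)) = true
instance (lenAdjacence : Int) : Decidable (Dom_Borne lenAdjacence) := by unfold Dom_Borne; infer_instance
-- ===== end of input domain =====

-- B replaces A's summation loop over powers of two by the geometric-sum closed form (objective: faster).

-- ===== PORT A =====
def Borne (lenAdjacence : Int) : Int :=
  -- for i in range(0, lenAdjacence): borne += 2**i   (i ≥ 0 inside the range, so 2^i.toNat is exact)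
  let borne := (PySem.List.pyRange 0 lenAdjacence 1).foldl (fun borne i => borne + 2 ^ i.toNat) 0
  let a := lenAdjacence - 1
  let d := lenAdjacence - 1
  -- 10**len(str(borne)): borne ≥ 0 here, exponent is the digit count, nonnegative
  let da := (a + d * lenAdjacence) * 10 ^ (PySem.Str.len (PySem.Int.toStr borne)).toNat
  da + borne

-- ===== PORT B =====
def Borne_alt (lenAdjacence : Int) : Int :=
  let borne := if lenAdjacence > 0 then 2 ^ lenAdjacence.toNat - 1 else 0
  (lenAdjacence - 1) * (lenAdjacence + 1) * 10 ^ (PySem.Str.len (PySem.Int.toStr borne)).toNat + borne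

-- ===== PRECONDITION & SPEC =====
def Spec_Borne (lenAdjacence : Int) (out : Int) : Prop := out = Borne_alt lenAdjacence
instance (lenAdjacence : Int) (out : Int) : Decidable (Spec_Borne lenAdjacence out) := by unfold Spec_Borne; infer_instance

-- ===== CLAIM (what is proved, stated in full; the proofs are below) =====
def Claim_equal_Borne : Prop := ∀ (lenAdjacence : Int), Dom_Borne lenAdjacence → Spec_Borne lenAdjacence (Borne lenAdjacence)

-- ===== LEMMAS AND PROOFS =====
theorem borne_sum_nat (n : Nat) (init : Int) :
    (PySem.List.pyRange 0 (n : Int) 1).foldl (fun b i => b + 2 ^ i.toNat) init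
      = init + 2 ^ n - 1 := by
  induction n generalizing init with
  | zero => simp [PySem.List.pyRange_one_eq_nil]
  | succ k ih =>
      have h : ((k : Int) + 1) = ((k + 1 : Nat) : Int) := by push_cast; ring
      rw [show ((k + 1 : Nat) : Int) = (k : Int) + 1 by push_cast; ring,
          PySem.List.pyRange_one_succ_right (by positivity), List.foldl_append, ih]
      simp [pow_succ]
      ring

theorem borne_sum (n : Int) :
    (PySem.List.pyRange 0 n 1).foldl (fun b i => b + 2 ^ i.toNat) (0 : Int)
      = if n > 0 then (2 : Int) ^ n.toNat - 1 else 0 := by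
  by_cases h : n > 0
  · obtain ⟨m, rfl⟩ : ∃ m : Nat, n = (m : Int) := ⟨n.toNat, by omega⟩
    rw [if_pos h, borne_sum_nat]
    simp
  · rw [if_neg h, PySem.List.pyRange_one_eq_nil (by omega)]
    rfl

-- ===== VERDICT (by name: the statement is the Claim_ definition above) =====
theorem Borne_spec : Claim_equal_Borne := by
  intro n _
  show Borne n = Borne_alt n
  simp only [Borne, Borne_alt, borne_sum]
  ring
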